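-- pv_equiv track=rewrite | github.com/clear668866x6/algorithm | practice/CF-1809c.py | solve
-- ===== SOURCE A (Python) =====
-- def solve(n, k):
--     if n == 0:
--         return []
--     if k < n:
--         a = [-1 for i in range(n)]
--         if k > 0:
--             a[k - 1] = 200
--         a[k] = -400
--     else:
--         a = solve(n - 1, k - n)
--         a.append(1000)
--     return a
-- ===== SOURCE B (Python) =====
-- def solve(n, k):
--     t = 0
--     while n != 0 and k >= n:
--         k -= n
--         n -= 1
--         t += 1
--     if n == 0:
--         a = []
--     else:
--         a = [-1] * n
--         if k > 0:
--             a[k - 1] = 200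
--         a[k] = -400
--     return a + [1000] * t
-- ===== Notes on version B (the rewrite author's own statement) =====
-- stated objective: simpler
-- what changed: Replaces A's self-referential recursion (which rebuilds the list by appending 1000 on each unwind) with a single iterative while-loop that counts the unwind steps, then builds the base array once and appends all 1000s in one concatenation.
import Mathlib
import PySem

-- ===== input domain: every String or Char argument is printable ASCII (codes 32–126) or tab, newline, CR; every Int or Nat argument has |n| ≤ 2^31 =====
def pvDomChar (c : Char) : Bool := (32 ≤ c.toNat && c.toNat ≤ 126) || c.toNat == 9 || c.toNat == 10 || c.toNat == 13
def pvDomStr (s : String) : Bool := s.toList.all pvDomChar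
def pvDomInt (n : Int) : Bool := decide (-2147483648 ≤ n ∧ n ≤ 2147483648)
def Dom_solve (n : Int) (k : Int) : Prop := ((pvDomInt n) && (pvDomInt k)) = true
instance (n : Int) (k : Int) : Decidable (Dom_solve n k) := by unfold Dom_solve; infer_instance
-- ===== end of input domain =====

-- B replaces A's recursion by an explicit counting loop plus one final concatenation; objective: simpler.

-- ===== PORT A =====
-- fuel = n.toNat bounds the recursion depth (each recursive call decreases n by 1
-- and is only reached when n ≠ 0; inside Pre_solve n ≥ 0, so fuel never runs out)
def solveAAux (fuel : Nat) (n : Int) (k : Int) : List Int :=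
  if n = 0 then []
  else if k < n then
    let a := List.replicate n.toNat (-1 : Int)       -- [-1 for i in range(n)]
    let a := if k > 0 then PySem.List.pySetD a (k - 1) 200 else a   -- a[k-1] = 200
    PySem.List.pySetD a k (-400)                     -- a[k] = -400 (Python negative indexing)
  else
    match fuel with
    | 0 => []
    | f + 1 => solveAAux f (n - 1) (k - n) ++ [1000] -- a = solve(n-1, k-n); a.append(1000)

def solve (n : Int) (k : Int) : List Int := solveAAux n.toNat n k

-- ===== PORT B =====
-- while n != 0 and k >= n: k -= n; n -= 1; t += 1   (fuel = n.toNat, same totality device)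
def solveAltLoop (fuel : Nat) (n : Int) (k : Int) (t : Nat) : Int × Int × Nat :=
  if n ≠ 0 ∧ n ≤ k then
    match fuel with
    | 0 => (n, k, t)
    | f + 1 => solveAltLoop f (n - 1) (k - n) (t + 1)
  else (n, k, t)

def solveAltBase (n : Int) (k : Int) : List Int :=
  if n = 0 then []
  else
    let a := List.replicate n.toNat (-1 : Int)
    let a := if k > 0 then PySem.List.pySetD a (k - 1) 200 else a
    PySem.List.pySetD a k (-400)

def solve_alt (n : Int) (k : Int) : List Int :=
  let r := solveAltLoop n.toNat n k 0
  solveAltBase r.1 r.2.1 ++ List.replicate r.2.2 (1000 : Int)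

-- ===== PRECONDITION & SPEC =====
-- Pre_solve is exactly where the Python A returns: for n < 0 A recurses forever
-- (RecursionError), and for n > 0, k < -n the base case's a[k] raises IndexError.
def Pre_solve (n : Int) (k : Int) : Prop := 0 ≤ n ∧ (n = 0 ∨ -n ≤ k)
instance (n : Int) (k : Int) : Decidable (Pre_solve n k) := by unfold Pre_solve; infer_instance
def pvWitness_solve : Int × Int := (4, 7)

def Spec_solve (n : Int) (k : Int) (out : List Int) : Prop := out = solve_alt n k
instance (n : Int) (k : Int) (out : List Int) : Decidable (Spec_solve n k out) := by unfold Spec_solve; infer_instance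

-- ===== CLAIM (what is proved, stated in full; the proofs are below) =====
def Claim_equal_solve : Prop := ∀ (n : Int) (k : Int), Dom_solve n k → Pre_solve n k → Spec_solve n k (solve n k)

-- ===== LEMMAS AND PROOFS =====

-- the loop's counter is a pure accumulator: starting it at t just adds t to the result
theorem solveAltLoop_shift (fuel : Nat) : ∀ (n k : Int) (t : Nat),
    solveAltLoop fuel n k t =
      ((solveAltLoop fuel n k 0).1, (solveAltLoop fuel n k 0).2.1,
        (solveAltLoop fuel n k 0).2.2 + t) := by
  induction fuel with
  | zero =>
    intro n k t
    simp only [solveAltLoop]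
    split <;> simp
  | succ f ih =>
    intro n k t
    simp only [solveAltLoop]
    split
    · rw [ih (n - 1) (k - n) (t + 1), ih (n - 1) (k - n) (0 + 1)]
      simp; omega
    · simp

-- main invariant: with enough fuel, A's recursion computes B's loop-then-concatenate value
theorem solveAAux_eq (fuel : Nat) : ∀ (n k : Int), 0 ≤ n → n.toNat ≤ fuel →
    solveAAux fuel n k =
      solveAltBase (solveAltLoop fuel n k 0).1 (solveAltLoop fuel n k 0).2.1 ++
        List.replicate (solveAltLoop fuel n k 0).2.2 (1000 : Int) := by
  induction fuel with
  | zero =>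
    intro n k hn hf
    have h0 : n = 0 := by omega
    subst h0
    simp [solveAAux, solveAltLoop, solveAltBase]
  | succ f ih =>
    intro n k hn hf
    by_cases h0 : n = 0
    · subst h0
      simp [solveAAux, solveAltLoop, solveAltBase]
    · by_cases hk : k < n
      · have hcond : ¬ (n ≠ 0 ∧ n ≤ k) := by omega
        simp only [solveAAux, solveAltLoop, if_neg h0, if_pos hk, if_neg hcond]
        simp [solveAltBase, if_neg h0]
      · have hcond : n ≠ 0 ∧ n ≤ k := by omega
        have hrec := ih (n - 1) (k - n) (by omega) (by omega)
        simp only [solveAAux, solveAltLoop, if_neg h0, if_neg hk, if_pos hcond]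
        rw [hrec, solveAltLoop_shift f (n - 1) (k - n) (0 + 1)]
        simp [List.replicate_succ']

-- ===== VERDICT (by name: the statement is the Claim_ definition above) =====
theorem solve_spec : Claim_equal_solve := by
  intro n k _ hpre
  unfold Spec_solve solve solve_alt
  exact solveAAux_eq n.toNat n k hpre.1 le_rfl
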